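-- pv_equiv track=rewrite | github.com/sajjad1392/Phishing-Detection-Using-ML-Classifiers | lib/functions.py | count_delims
-- ===== SOURCE A (Python) =====
-- def count(text, character):
--     """Return the amount of certain character in the text."""
--     return text.lower().count(character)
--
-- def count_delims(text):
--     """Return the number of characters."""
--     charact = ['~', '`', '!', '^', '*', '(', ')', '[', ']', '{', '}', '"', "'", ';', ',', '>', '<', '|']
--     count = 0
--     for i in charact:
--         count += text.lower().count(i)
--
--     if count > 0:
--         return 1
--     else:
--         return 0
-- ===== SOURCE B (Python) =====
-- def count_delims(text):
--     """Return 1 if the text contains any delimiter character, else 0."""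
--     delims = {'~', '`', '!', '^', '*', '(', ')', '[', ']', '{', '}', '"', "'", ';', ',', '>', '<', '|'}
--     return 1 if set(text) & delims else 0
-- ===== Notes on version B (the rewrite author's own statement) =====
-- stated objective: faster
-- what changed: Instead of lowercasing the text and scanning it 18 times with .count (once per delimiter) and summing, B builds the set of distinct characters of the text once and tests whether it intersects the 18-delimiter set; the .lower() is dropped since no delimiter is a letter.
import Mathlib
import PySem

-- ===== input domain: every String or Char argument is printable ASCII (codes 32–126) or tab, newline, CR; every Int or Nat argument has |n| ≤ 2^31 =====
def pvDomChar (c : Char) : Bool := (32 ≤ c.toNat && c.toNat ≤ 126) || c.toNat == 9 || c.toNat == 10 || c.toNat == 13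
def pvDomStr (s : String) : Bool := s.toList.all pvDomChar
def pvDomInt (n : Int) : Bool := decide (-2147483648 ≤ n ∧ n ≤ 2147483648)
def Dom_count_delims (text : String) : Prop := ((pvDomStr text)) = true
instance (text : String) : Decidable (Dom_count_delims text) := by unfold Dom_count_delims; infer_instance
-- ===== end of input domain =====

-- B replaces A's 18 whole-text .count scans of text.lower() (summed, then thresholded) by one
-- set(text) pass intersected with the set of the 18 delimiter characters (objective: faster).

-- ===== PORT A =====
def count_delims (text : String) : Int :=
  let charact : List String := ["~", "`", "!", "^", "*", "(", ")", "[", "]", "{", "}", "\"", "'", ";", ",", ">", "<", "|"]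
  let count : Int := charact.foldl (fun acc i => acc + ((PySem.Str.count (PySem.Str.lower text) i : Nat) : Int)) 0
  if count > 0 then 1 else 0

-- ===== PORT B =====
def count_delims_alt (text : String) : Int :=
  let delims : PySem.Set Char := PySem.Set.ofList ['~', '`', '!', '^', '*', '(', ')', '[', ']', '{', '}', '"', '\'', ';', ',', '>', '<', '|']
  if PySem.Set.inter (PySem.Set.ofList text.toList) delims ≠ [] then 1 else 0

-- ===== PRECONDITION & SPEC =====
def Spec_count_delims (text : String) (out : Int) : Prop := out = count_delims_alt text
instance (text : String) (out : Int) : Decidable (Spec_count_delims text out) := by unfold Spec_count_delims; infer_instance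

-- ===== CLAIM (what is proved, stated in full; the proofs are below) =====
def Claim_equal_count_delims : Prop := ∀ (text : String), Dom_count_delims text → Spec_count_delims text (count_delims text)

-- ===== LEMMAS AND PROOFS =====

-- the 18 delimiter characters, as the proofs refer to them
def pvL : List Char := ['~', '`', '!', '^', '*', '(', ')', '[', ']', '{', '}', '"', '\'', ';', ',', '>', '<', '|']

-- counting a single character as a substring is List.count
theorem pv_go_count (c : Char) : ∀ (fuel : Nat) (l : List Char) (acc : Nat),
    l.length ≤ fuel → PySem.Chars.count.go [c] fuel l acc = acc + l.count c := by
  intro fuel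
  induction fuel with
  | zero =>
    intro l acc h
    cases l with
    | nil => simp [PySem.Chars.count.go]
    | cons x t => simp at h
  | succ n ih =>
    intro l acc h
    cases l with
    | nil => simp [PySem.Chars.count.go]
    | cons x t =>
      simp only [PySem.Chars.count.go]
      by_cases hx : c = x
      · subst hx
        simp only [List.isPrefixOf, beq_self_eq_true, Bool.true_and, if_true,
          List.length_cons, List.drop_succ_cons]
        simp only [List.length_nil, List.drop_zero]
        rw [ih t (acc + 1) (by simpa using h)]
        simp
        omega
      · have hbx : (c == x) = false := by simp [hx]
        simp only [List.isPrefixOf, hbx, Bool.false_and, Bool.false_eq_true, if_false]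
        rw [ih t acc (by simpa using h)]
        simp [Ne.symm hx]

theorem pv_count_single (l : List Char) (c : Char) :
    PySem.Chars.count l [c] = l.count c := by
  rw [PySem.Chars.count]
  simp only [List.isEmpty_cons, Bool.false_eq_true, if_false]
  simpa using pv_go_count c l.length l 0 le_rfl

-- lowercasing cannot create or destroy a delimiter character (delimiters are punctuation)
theorem pv_lowerChar_delim (c d : Char) (hd : d ∈ pvL) :
    (PySem.Chars.lowerChar c = d) ↔ c = d := by
  have hdN : (d.toNat < 65 ∨ 90 < d.toNat) ∧ (d.toNat < 97 ∨ 122 < d.toNat) := by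
    fin_cases hd <;> decide
  by_cases hu : PySem.Chars.isupper c = true
  · have hA : 65 ≤ c.toNat ∧ c.toNat ≤ 90 := by
      simp [PySem.Chars.isupper, Char.le_def, UInt32.le_iff_toNat_le] at hu
      exact ⟨hu.1, hu.2⟩
    have hlc : (PySem.Chars.lowerChar c).toNat = c.toNat + 32 := by
      simp [PySem.Chars.lowerChar, hu, Char.toNat_ofNat, Nat.isValidChar]
      omega
    constructor
    · intro h
      exfalso
      have hh := congrArg Char.toNat h
      rw [hlc] at hh
      omega
    · intro h
      exfalso
      have hh := congrArg Char.toNat h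
      omega
  · have hc : PySem.Chars.lowerChar c = c := by simp [PySem.Chars.lowerChar, hu]
    rw [hc]

theorem pv_count_lower (cs : List Char) (d : Char) (hd : d ∈ pvL) :
    (PySem.Chars.lower cs).count d = cs.count d := by
  induction cs with
  | nil => simp [PySem.Chars.lower]
  | cons x t ih =>
    simp only [PySem.Chars.lower, List.map_cons]
    rw [List.count_cons, List.count_cons]
    have iht : List.count d (List.map PySem.Chars.lowerChar t) = List.count d t := by
      simpa [PySem.Chars.lower] using ih
    rw [iht]
    have hiff := pv_lowerChar_delim x d hd
    by_cases h : x = d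
    · subst h
      simp [hiff.mpr rfl]
    · have h2 : ¬ PySem.Chars.lowerChar x = d := fun hh => h (hiff.mp hh)
      simp [h, h2]

-- one term of A's loop, for a one-character delimiter string
theorem pv_key (s : String) (sd : String) (d : Char) (hsd : sd.toList = [d]) (hd : d ∈ pvL) :
    PySem.Str.count (PySem.Str.lower s) sd = s.toList.count d := by
  rw [PySem.Str.count_eq, PySem.Str.toList_lower, hsd, pv_count_single,
    pv_count_lower s.toList d hd]

-- positivity of A's accumulating loop
theorem pv_foldl_pos (f : String → Nat) : ∀ (LS : List String) (a : Int), 0 ≤ a →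
    ((0 < LS.foldl (fun acc i => acc + (f i : Int)) a) ↔ (0 < a ∨ ∃ i ∈ LS, 0 < f i)) := by
  intro LS
  induction LS with
  | nil => intro a _; simp
  | cons x xs ih =>
    intro a ha
    have ha' : 0 ≤ a + (f x : Int) := by positivity
    simp only [List.foldl_cons, ih (a + (f x : Int)) ha', List.exists_mem_cons_iff]
    have hfx : (0 : Int) ≤ (f x : Int) := by positivity
    constructor
    · rintro (h | h)
      · by_cases hp : 0 < f x
        · exact Or.inr (Or.inl hp)
        · left
          have hz : f x = 0 := by omega
          rw [hz] at h
          simpa using h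
      · exact Or.inr (Or.inr h)
    · rintro (h | h | h)
      · left; omega
      · left
        have : (0 : Int) < (f x : Int) := by exact_mod_cast h
        omega
      · right; exact h

theorem pv_set_eq : PySem.Set.ofList ['~', '`', '!', '^', '*', '(', ')', '[', ']', '{', '}', '"', '\'', ';', ',', '>', '<', '|'] = pvL := by decide

-- ===== VERDICT (by name: the statement is the Claim_ definition above) =====
theorem count_delims_spec : Claim_equal_count_delims := by
  intro text _hdom
  unfold Spec_count_delims count_delims count_delims_alt
  simp only [gt_iff_lt, pv_set_eq]
  apply if_congr _ rfl rfl
  rw [pv_foldl_pos (fun i => PySem.Str.count (PySem.Str.lower text) i) _ 0 le_rfl]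
  simp only [lt_self_iff_false, false_or]
  have hB : (PySem.Set.inter (PySem.Set.ofList text.toList) pvL ≠ []) ↔
      ∃ c ∈ text.toList, c ∈ pvL := by
    constructor
    · intro h
      obtain ⟨x, hx⟩ := List.exists_mem_of_ne_nil _ h
      rw [PySem.Set.mem_inter, PySem.Set.mem_ofList] at hx
      exact ⟨x, hx.1, hx.2⟩
    · rintro ⟨c, h1, h2⟩
      intro hnil
      have hm : c ∈ PySem.Set.inter (PySem.Set.ofList text.toList) pvL := by
        rw [PySem.Set.mem_inter, PySem.Set.mem_ofList]
        exact ⟨h1, h2⟩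
      rw [hnil] at hm
      simp at hm
  rw [hB]
  have hterm : ∀ i ∈ (["~", "`", "!", "^", "*", "(", ")", "[", "]", "{", "}", "\"", "'", ";", ",", ">", "<", "|"] : List String), ∃ d, i.toList = [d] ∧ d ∈ pvL ∧
      PySem.Str.count (PySem.Str.lower text) i = text.toList.count d := by
    intro i hi
    simp only [List.mem_cons, List.not_mem_nil, or_false] at hi
    rcases hi with rfl|rfl|rfl|rfl|rfl|rfl|rfl|rfl|rfl|rfl|rfl|rfl|rfl|rfl|rfl|rfl|rfl|rfl
    · exact ⟨'~', by decide, by decide, pv_key text "~" '~' (by decide) (by decide)⟩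
    · exact ⟨'`', by decide, by decide, pv_key text "`" '`' (by decide) (by decide)⟩
    · exact ⟨'!', by decide, by decide, pv_key text "!" '!' (by decide) (by decide)⟩
    · exact ⟨'^', by decide, by decide, pv_key text "^" '^' (by decide) (by decide)⟩
    · exact ⟨'*', by decide, by decide, pv_key text "*" '*' (by decide) (by decide)⟩
    · exact ⟨'(', by decide, by decide, pv_key text "(" '(' (by decide) (by decide)⟩
    · exact ⟨')', by decide, by decide, pv_key text ")" ')' (by decide) (by decide)⟩
    · exact ⟨'[', by decide, by decide, pv_key text "[" '[' (by decide) (by decide)⟩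
    · exact ⟨']', by decide, by decide, pv_key text "]" ']' (by decide) (by decide)⟩
    · exact ⟨'{', by decide, by decide, pv_key text "{" '{' (by decide) (by decide)⟩
    · exact ⟨'}', by decide, by decide, pv_key text "}" '}' (by decide) (by decide)⟩
    · exact ⟨'"', by decide, by decide, pv_key text "\"" '"' (by decide) (by decide)⟩
    · exact ⟨'\'', by decide, by decide, pv_key text "'" '\'' (by decide) (by decide)⟩
    · exact ⟨';', by decide, by decide, pv_key text ";" ';' (by decide) (by decide)⟩
    · exact ⟨',', by decide, by decide, pv_key text "," ',' (by decide) (by decide)⟩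
    · exact ⟨'>', by decide, by decide, pv_key text ">" '>' (by decide) (by decide)⟩
    · exact ⟨'<', by decide, by decide, pv_key text "<" '<' (by decide) (by decide)⟩
    · exact ⟨'|', by decide, by decide, pv_key text "|" '|' (by decide) (by decide)⟩
  constructor
  · rintro ⟨i, hi, hpos⟩
    obtain ⟨d, hsd, hdL, hcount⟩ := hterm i hi
    rw [hcount] at hpos
    exact ⟨d, List.count_pos_iff.mp hpos, hdL⟩
  · rintro ⟨c, hccs, hcL⟩
    simp only [pvL, List.mem_cons, List.not_mem_nil, or_false] at hcL
    rcases hcL with rfl|rfl|rfl|rfl|rfl|rfl|rfl|rfl|rfl|rfl|rfl|rfl|rfl|rfl|rfl|rfl|rfl|rfl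
    · exact ⟨"~", by decide, by rw [pv_key text "~" '~' (by decide) (by decide)]; exact List.count_pos_iff.mpr hccs⟩
    · exact ⟨"`", by decide, by rw [pv_key text "`" '`' (by decide) (by decide)]; exact List.count_pos_iff.mpr hccs⟩
    · exact ⟨"!", by decide, by rw [pv_key text "!" '!' (by decide) (by decide)]; exact List.count_pos_iff.mpr hccs⟩
    · exact ⟨"^", by decide, by rw [pv_key text "^" '^' (by decide) (by decide)]; exact List.count_pos_iff.mpr hccs⟩
    · exact ⟨"*", by decide, by rw [pv_key text "*" '*' (by decide) (by decide)]; exact List.count_pos_iff.mpr hccs⟩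
    · exact ⟨"(", by decide, by rw [pv_key text "(" '(' (by decide) (by decide)]; exact List.count_pos_iff.mpr hccs⟩
    · exact ⟨")", by decide, by rw [pv_key text ")" ')' (by decide) (by decide)]; exact List.count_pos_iff.mpr hccs⟩
    · exact ⟨"[", by decide, by rw [pv_key text "[" '[' (by decide) (by decide)]; exact List.count_pos_iff.mpr hccs⟩
    · exact ⟨"]", by decide, by rw [pv_key text "]" ']' (by decide) (by decide)]; exact List.count_pos_iff.mpr hccs⟩
    · exact ⟨"{", by decide, by rw [pv_key text "{" '{' (by decide) (by decide)]; exact List.count_pos_iff.mpr hccs⟩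
    · exact ⟨"}", by decide, by rw [pv_key text "}" '}' (by decide) (by decide)]; exact List.count_pos_iff.mpr hccs⟩
    · exact ⟨"\"", by decide, by rw [pv_key text "\"" '"' (by decide) (by decide)]; exact List.count_pos_iff.mpr hccs⟩
    · exact ⟨"'", by decide, by rw [pv_key text "'" '\'' (by decide) (by decide)]; exact List.count_pos_iff.mpr hccs⟩
    · exact ⟨";", by decide, by rw [pv_key text ";" ';' (by decide) (by decide)]; exact List.count_pos_iff.mpr hccs⟩
    · exact ⟨",", by decide, by rw [pv_key text "," ',' (by decide) (by decide)]; exact List.count_pos_iff.mpr hccs⟩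
    · exact ⟨">", by decide, by rw [pv_key text ">" '>' (by decide) (by decide)]; exact List.count_pos_iff.mpr hccs⟩
    · exact ⟨"<", by decide, by rw [pv_key text "<" '<' (by decide) (by decide)]; exact List.count_pos_iff.mpr hccs⟩
    · exact ⟨"|", by decide, by rw [pv_key text "|" '|' (by decide) (by decide)]; exact List.count_pos_iff.mpr hccs⟩
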